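-- pv_equiv track=rewrite | github.com/masorange/titan-cli | plugins/titan-plugin-jira/titan_plugin_jira/agents/jira_agent.py | _parse_subtasks_response
-- ===== SOURCE A (Python) =====
-- from typing import Optional, List, Dict, Any
--
-- def _parse_subtasks_response(content: str) -> Dict[str, Any]:
--     """Parse subtasks suggestion response."""
--     result = {"subtasks": []}
--
--     current_subtask = None
--     lines = content.split("\n")
--
--     for line in lines:
--         line = line.strip()
--
--         if line.startswith("SUBTASK_"):
--             if current_subtask:
--                 result["subtasks"].append(current_subtask)
--             current_subtask = {"summary": "", "description": ""}
--         elif current_subtask: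
--             if line.startswith("Summary:"):
--                 current_subtask["summary"] = line.split(":", 1)[1].strip()
--             elif line.startswith("Description:"):
--                 current_subtask["description"] = line.split(":", 1)[1].strip()
--
--     # Add last subtask
--     if current_subtask:
--         result["subtasks"].append(current_subtask)
--
--     return result
-- ===== SOURCE B (Python) =====
-- def _parse_subtasks_response(content):
--     """Parse subtasks suggestion response: pre-strip all lines, skip the
--     preamble, then consume one marker-delimited block at a time."""
--     lines = [ln.strip() for ln in content.split("\n")]
--     n = len(lines)
--     i = 0
--     while i < n and not lines[i].startswith("SUBTASK_"):
--         i += 1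
--     subtasks = []
--     while i < n:
--         i += 1  # skip the marker line
--         summary = ""
--         description = ""
--         while i < n and not lines[i].startswith("SUBTASK_"):
--             ln = lines[i]
--             if ln.startswith("Summary:"):
--                 summary = ln.split(":", 1)[1].strip()
--             elif ln.startswith("Description:"):
--                 description = ln.split(":", 1)[1].strip()
--             i += 1
--         subtasks.append({"summary": summary, "description": description})
--     return {"subtasks": subtasks}
-- ===== Notes on version B (the rewrite author's own statement) =====
-- stated objective: alternative
-- what changed: Replaces A's single scan carrying an Optional current_subtask accumulator with its end-of-loop flush by a block-structured parse: strip all lines up front, skip the preamble before the first SUBTASK_ marker, then consume one marker-delimited block at a time into (summary, description) fields.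
import Mathlib
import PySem

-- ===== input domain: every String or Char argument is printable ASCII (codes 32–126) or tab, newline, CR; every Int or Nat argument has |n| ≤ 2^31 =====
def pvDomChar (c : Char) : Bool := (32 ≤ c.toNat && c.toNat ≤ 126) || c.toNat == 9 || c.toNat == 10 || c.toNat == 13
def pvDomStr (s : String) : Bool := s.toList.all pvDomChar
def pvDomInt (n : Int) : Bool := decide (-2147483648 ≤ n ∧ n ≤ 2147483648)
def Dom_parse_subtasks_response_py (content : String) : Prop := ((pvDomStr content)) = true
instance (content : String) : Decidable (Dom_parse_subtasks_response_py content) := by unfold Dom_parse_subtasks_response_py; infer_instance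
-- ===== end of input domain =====

-- B restructures A's accumulator scan as a block-structured parse; same cost, different decomposition (objective: alternative).

-- ===== PORT A =====
-- line.split(":", 1)[1].strip()  (the callers only use it on lines that contain ':')
def pa_after (line : String) : String :=
  PySem.Str.strip (((PySem.Str.splitMax? line ":" 1).getD []).getD 1 "")

-- one iteration of A's for-loop over (acc = result["subtasks"], cur = current_subtask)
def pa_step (acc : List (PySem.Dict String String)) (cur : Option (PySem.Dict String String))
    (line0 : String) : List (PySem.Dict String String) × Option (PySem.Dict String String) :=
  let line := PySem.Str.strip line0
  if PySem.Str.startswith line "SUBTASK_" then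
    ((match cur with | some c => acc ++ [c] | none => acc),
     some ((PySem.Dict.empty.insert "summary" "").insert "description" ""))
  else
    match cur with
    | some c =>
      if PySem.Str.startswith line "Summary:" then (acc, some (c.insert "summary" (pa_after line)))
      else if PySem.Str.startswith line "Description:" then (acc, some (c.insert "description" (pa_after line)))
      else (acc, some c)
    | none => (acc, none)

def parse_subtasks_response_py (content : String) : List (String × List (List (String × String))) :=
  let lines := (PySem.Str.split? content "\n").getD []
  let st := lines.foldl (fun p line => pa_step p.1 p.2 line) ([], none)
  let subs := match st.2 with | some c => st.1 ++ [c] | none => st.1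
  [("subtasks", subs.map (fun d => d.items))]

-- ===== PORT B =====
def pb_after (line : String) : String :=
  PySem.Str.strip (((PySem.Str.splitMax? line ":" 1).getD []).getD 1 "")

-- inner while: consume field lines up to the next marker (or end), last match wins
def pb_block : List String → String → String → (String × String) × List String
  | [], s, d => ((s, d), [])
  | ln :: rest, s, d =>
    if PySem.Str.startswith ln "SUBTASK_" then ((s, d), ln :: rest)
    else if PySem.Str.startswith ln "Summary:" then pb_block rest (pb_after ln) d
    else if PySem.Str.startswith ln "Description:" then pb_block rest s (pb_after ln)
    else pb_block rest s d

theorem pb_block_length_le (ls : List String) (s d : String) :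
    (pb_block ls s d).2.length ≤ ls.length := by
  induction ls generalizing s d with
  | nil => simp [pb_block]
  | cons ln rest ih =>
    simp only [pb_block]
    split_ifs <;> simp_all <;> exact le_trans (by apply ih) (Nat.le_succ _)

-- outer while: one marker-delimited block per iteration
def pb_blocks : List String → List (List (String × String))
  | [] => []
  | _marker :: rest =>
    let r := pb_block rest "" ""
    [("summary", r.1.1), ("description", r.1.2)] :: pb_blocks r.2
termination_by ls => ls.length
decreasing_by
  simpa using Nat.lt_succ_of_le (pb_block_length_le rest "" "")

def parse_subtasks_response_py_alt (content : String) : List (String × List (List (String × String))) :=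
  let lines := ((PySem.Str.split? content "\n").getD []).map PySem.Str.strip
  let rest := lines.dropWhile (fun l => !PySem.Str.startswith l "SUBTASK_")
  [("subtasks", pb_blocks rest)]

-- ===== PRECONDITION & SPEC =====
def Spec_parse_subtasks_response_py (content : String) (out : List (String × List (List (String × String)))) : Prop := out = parse_subtasks_response_py_alt content
instance (content : String) (out : List (String × List (List (String × String)))) : Decidable (Spec_parse_subtasks_response_py content out) := by unfold Spec_parse_subtasks_response_py; infer_instance

-- ===== CLAIM (what is proved, stated in full; the proofs are below) =====
def Claim_equal_parse_subtasks_response_py : Prop := ∀ (content : String), Dom_parse_subtasks_response_py content → Spec_parse_subtasks_response_py content (parse_subtasks_response_py content)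

-- ===== LEMMAS AND PROOFS =====

-- the subtask dict {"summary": s, "description": d} as a PySem.Dict
def sdict (s d : String) : PySem.Dict String String :=
  (PySem.Dict.empty.insert "summary" s).insert "description" d

theorem sdict_items (s d : String) : (sdict s d).items = [("summary", s), ("description", d)] := by
  simp [sdict, PySem.Dict.empty, PySem.Dict.insert]

theorem sdict_insert_summary (s d v : String) : (sdict s d).insert "summary" v = sdict v d := by
  simp [sdict, PySem.Dict.empty, PySem.Dict.insert]

theorem sdict_insert_description (s d v : String) : (sdict s d).insert "description" v = sdict s v := by
  simp [sdict, PySem.Dict.empty, PySem.Dict.insert]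

-- A's fold (over already-stripped lines, see the verdict proof) and final flush
def pa_run (ls : List String) (st : List (PySem.Dict String String) × Option (PySem.Dict String String)) :
    List (PySem.Dict String String) × Option (PySem.Dict String String) :=
  ls.foldl (fun p line => pa_step p.1 p.2 line) st

def pa_final (st : List (PySem.Dict String String) × Option (PySem.Dict String String)) :
    List (List (String × String)) :=
  (match st.2 with | some c => st.1 ++ [c] | none => st.1).map (fun d => PySem.Dict.items d)

theorem pa_run_cons (ln : String) (rest : List String)
    (st : List (PySem.Dict String String) × Option (PySem.Dict String String)) :
    pa_run (ln :: rest) st = pa_run rest (pa_step st.1 st.2 ln) := rfl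

-- in-block invariant: from state (acc, some (sdict s d)) A produces exactly B's current block then continues
theorem pa_run_block (ls : List String) (acc : List (PySem.Dict String String)) (s d : String)
    (hs : ∀ l ∈ ls, PySem.Str.strip l = l) :
    pa_final (pa_run ls (acc, some (sdict s d))) =
      acc.map (fun x => PySem.Dict.items x) ++
        ([("summary", (pb_block ls s d).1.1), ("description", (pb_block ls s d).1.2)] ::
          pb_blocks (pb_block ls s d).2) := by
  induction ls generalizing acc s d with
  | nil => simp [pa_run, pa_final, pb_block, pb_blocks, sdict_items]
  | cons ln rest ih =>
    have hln : PySem.Str.strip ln = ln := hs ln (by simp)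
    have hln' : PySem.Chars.strip ln.toList = ln.toList := by
      have := congrArg String.toList hln; simpa using this
    have hrest : ∀ l ∈ rest, PySem.Str.strip l = l := fun l hl => hs l (by simp [hl])
    rw [pa_run_cons]
    by_cases h1 : PySem.Str.startswith ln "SUBTASK_"
    · simp at h1
      have hstep : pa_step acc (some (sdict s d)) ln = (acc ++ [sdict s d], some (sdict "" "")) := by
        simp [pa_step, hln', h1]; rfl
      rw [hstep, ih _ _ _ hrest]
      simp [pb_block, h1, pb_blocks, sdict_items]
    · simp at h1
      by_cases h2 : PySem.Str.startswith ln "Summary:"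
      · simp at h2
        have hstep : pa_step acc (some (sdict s d)) ln = (acc, some (sdict (pa_after ln) d)) := by
          simp [pa_step, hln', h1, h2, sdict_insert_summary]; rw [hln]
        rw [hstep, ih _ _ _ hrest]
        simp [pb_block, h1, h2, pb_after, pa_after]
      · simp at h2
        by_cases h3 : PySem.Str.startswith ln "Description:"
        · simp at h3
          have hstep : pa_step acc (some (sdict s d)) ln = (acc, some (sdict s (pa_after ln))) := by
            simp [pa_step, hln', h1, h2, h3, sdict_insert_description]; rw [hln]
          rw [hstep, ih _ _ _ hrest]
          simp [pb_block, h1, h2, h3, pb_after, pa_after]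
        · simp at h3
          have hstep : pa_step acc (some (sdict s d)) ln = (acc, some (sdict s d)) := by
            simp [pa_step, hln', h1, h2, h3]
          rw [hstep, ih _ _ _ hrest]
          simp [pb_block, h1, h2, h3]

-- preamble invariant: with no current subtask A skips lines exactly like B's dropWhile
theorem pa_run_none (ls : List String) (acc : List (PySem.Dict String String))
    (hs : ∀ l ∈ ls, PySem.Str.strip l = l) :
    pa_final (pa_run ls (acc, none)) =
      acc.map (fun x => PySem.Dict.items x) ++
        pb_blocks (ls.dropWhile (fun l => !PySem.Str.startswith l "SUBTASK_")) := by
  induction ls generalizing acc with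
  | nil => simp [pa_run, pa_final, pb_blocks]
  | cons ln rest ih =>
    have hln : PySem.Str.strip ln = ln := hs ln (by simp)
    have hln' : PySem.Chars.strip ln.toList = ln.toList := by
      have := congrArg String.toList hln; simpa using this
    have hrest : ∀ l ∈ rest, PySem.Str.strip l = l := fun l hl => hs l (by simp [hl])
    rw [pa_run_cons]
    by_cases h1 : PySem.Str.startswith ln "SUBTASK_"
    · simp at h1
      have hstep : pa_step acc none ln = (acc, some (sdict "" "")) := by
        simp [pa_step, hln', h1]; rfl
      rw [hstep, pa_run_block rest acc "" "" hrest]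
      simp [h1, pb_blocks]
    · simp at h1
      have hstep : pa_step acc none ln = (acc, none) := by
        simp [pa_step, hln', h1]
      rw [hstep, ih _ hrest]
      simp [h1]

theorem strip_idem (l : List Char) : PySem.Chars.strip (PySem.Chars.strip l) = PySem.Chars.strip l := by
  unfold PySem.Chars.strip PySem.Chars.rstrip PySem.Chars.lstrip
  set p := PySem.Chars.isspace with hp
  set t := l.dropWhile p with ht
  have hpref : ((t.reverse.dropWhile p).reverse) <+: t := by
    have h := (List.dropWhile_suffix (l := t.reverse) p).reverse
    simpa using h
  have h1 : ((t.reverse.dropWhile p).reverse).dropWhile p = (t.reverse.dropWhile p).reverse := by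
    rcases hpref with ⟨r, hr⟩
    cases hu : (t.reverse.dropWhile p).reverse with
    | nil => simp
    | cons a u' =>
      have hT : t.dropWhile p = t := List.dropWhile_idempotent p l
      rw [hu] at hr
      have hpa : p a = false := by
        by_contra h
        simp only [Bool.not_eq_false] at h
        rw [← hr, List.cons_append, List.dropWhile_cons, h] at hT
        simp only [if_true] at hT
        have hlen := congrArg List.length hT
        have hle := List.length_dropWhile_le p (u' ++ r)
        simp at hlen hle
        omega
      simp [hpa]
  rw [h1, List.reverse_reverse, List.dropWhile_idempotent]

theorem strip_strip (l : String) : PySem.Str.strip (PySem.Str.strip l) = PySem.Str.strip l := by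
  have h := strip_idem l.toList
  apply String.toList_injective
  simp [PySem.Str.toList_strip, h]

-- ===== VERDICT (by name: the statement is the Claim_ definition above) =====
set_option maxHeartbeats 1000000 in
theorem parse_subtasks_response_py_spec : Claim_equal_parse_subtasks_response_py := by
  intro content _
  have hfold : ∀ (ls : List String) st,
      ls.foldl (fun p line => pa_step p.1 p.2 line) st =
        (ls.map PySem.Str.strip).foldl (fun p line => pa_step p.1 p.2 line) st := by
    intro ls
    induction ls with
    | nil => intro st; rfl
    | cons a t ih =>
      intro st
      simp only [List.map_cons, List.foldl_cons]
      rw [ih]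
      have hstep : pa_step st.1 st.2 (PySem.Str.strip a) = pa_step st.1 st.2 a := by
        simp only [pa_step, strip_strip]
      rw [hstep]
  have hmain := pa_run_none (((PySem.Str.split? content "\n").getD []).map PySem.Str.strip) []
    (by intro l hl; simp only [List.mem_map] at hl; obtain ⟨x, _, rfl⟩ := hl; exact strip_strip x)
  simp only [pa_run, pa_final, List.map_nil, List.nil_append] at hmain
  simp only [Spec_parse_subtasks_response_py, parse_subtasks_response_py,
    parse_subtasks_response_py_alt]
  rw [hfold]
  rw [hmain]
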